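-- pv_equiv track=rewrite | github.com/allenai/OLMo-core | src/scripts/train/OLMo3/OLMo3-600M-long-context.py | _compute_cp_degree
-- ===== SOURCE A (Python) =====
-- import math
-- from typing import List, Optional
--
-- MAX_TOKENS_PER_RANK = 32_768  # 600M fits more tokens per rank than 7B
--
-- def _compute_cp_degree(sequence_length: int, world_size: int) -> Optional[int]:
--     """Auto-compute context parallelism degree based on sequence length and world size."""
--     if sequence_length <= MAX_TOKENS_PER_RANK:
--         return None
--
--     min_cp = 2
--     while (sequence_length // min_cp) > MAX_TOKENS_PER_RANK:
--         min_cp *= 2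
--
--     cp_degree = min(min_cp, world_size)
--     if world_size % cp_degree != 0:
--         cp_degree = int(2 ** math.floor(math.log2(world_size)))
--
--     return cp_degree if cp_degree > 1 else None
-- ===== SOURCE B (Python) =====
-- MAX_TOKENS_PER_RANK = 32_768  # 600M fits more tokens per rank than 7B
--
-- def _compute_cp_degree(sequence_length, world_size):
--     """Auto-compute context parallelism degree based on sequence length and world size."""
--     if sequence_length <= MAX_TOKENS_PER_RANK:
--         return None
--
--     # closed form: smallest power of two p >= 2 with sequence_length // p <= MAX_TOKENS_PER_RANK,
--     # i.e. the next power of two >= sequence_length // (MAX_TOKENS_PER_RANK + 1) + 1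
--     q = sequence_length // (MAX_TOKENS_PER_RANK + 1)
--     min_cp = max(2, 1 << q.bit_length())
--
--     cp_degree = min(min_cp, world_size)
--     if world_size % cp_degree != 0:
--         cp_degree = 1 << (world_size.bit_length() - 1)
--
--     return cp_degree if cp_degree > 1 else None
-- ===== Notes on version B (the rewrite author's own statement) =====
-- stated objective: simpler
-- what changed: The doubling while-loop searching for the minimal context-parallel power of two is replaced by a closed-form computation: min_cp = max(2, next power of two >= sequence_length//(MAX_TOKENS_PER_RANK+1)+1) via int.bit_length, and the float math.log2 fallback is replaced by exact integer bit_length arithmetic.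
-- outside the precondition, e.g. on _compute_cp_degree(100000, 0): A raises ZeroDivisionError, B raises ZeroDivisionError
import Mathlib
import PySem

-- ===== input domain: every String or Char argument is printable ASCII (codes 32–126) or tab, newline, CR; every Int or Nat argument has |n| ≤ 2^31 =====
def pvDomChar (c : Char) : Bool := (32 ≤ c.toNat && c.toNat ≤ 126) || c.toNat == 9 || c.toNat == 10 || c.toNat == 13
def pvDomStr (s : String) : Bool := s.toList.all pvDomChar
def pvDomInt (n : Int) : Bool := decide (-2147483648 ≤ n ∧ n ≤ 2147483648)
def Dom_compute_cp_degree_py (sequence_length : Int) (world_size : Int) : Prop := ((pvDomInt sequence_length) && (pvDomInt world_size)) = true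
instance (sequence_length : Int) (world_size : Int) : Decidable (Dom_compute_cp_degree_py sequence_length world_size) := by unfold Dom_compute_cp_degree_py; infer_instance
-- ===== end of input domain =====

-- B replaces A's doubling while-loop by a closed-form bit_length computation of min_cp
-- (and the float math.log2 fallback by the same value computed with integer bit_length).

-- ===== PORT A =====
-- the `while (sequence_length // min_cp) > MAX_TOKENS_PER_RANK: min_cp *= 2` loop
def pyLoopA (sequence_length : Int) (min_cp : Int) (hm : 0 < min_cp) : Int :=
  if h : 32768 < PySem.Int.floordiv sequence_length min_cp then
    pyLoopA sequence_length (min_cp * 2) (by omega)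
  else
    min_cp
termination_by (sequence_length - min_cp).toNat
decreasing_by
  have h32769 : (32769 : Int) ≤ PySem.Int.floordiv sequence_length min_cp := by omega
  rw [PySem.Int.le_floordiv_iff_mul_le hm] at h32769
  omega

def compute_cp_degree_py (sequence_length : Int) (world_size : Int) : Option Int :=
  if sequence_length ≤ 32768 then none
  else
    let min_cp : Int := pyLoopA sequence_length 2 (by norm_num)
    let cp_degree : Int := min min_cp world_size
    let cp_degree : Int :=
      if PySem.Int.mod world_size cp_degree ≠ 0 then
        -- int(2 ** math.floor(math.log2(world_size))): on every reachable input here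
        -- 2 ≤ world_size ≤ 2^31, where float log2 is exact; ported as the largest
        -- power of two ≤ world_size.
        (2 : Int) ^ (PySem.Int.bitLength world_size - 1)
      else cp_degree
    if cp_degree > 1 then some cp_degree else none

-- ===== PORT B =====
def compute_cp_degree_py_alt (sequence_length : Int) (world_size : Int) : Option Int :=
  if sequence_length ≤ 32768 then none
  else
    let q : Int := PySem.Int.floordiv sequence_length 32769
    let min_cp : Int := max 2 ((2 : Int) ^ PySem.Int.bitLength q)  -- 1 << q.bit_length()
    let cp_degree : Int := min min_cp world_size
    let cp_degree : Int :=
      if PySem.Int.mod world_size cp_degree ≠ 0 then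
        (2 : Int) ^ (PySem.Int.bitLength world_size - 1)  -- 1 << (world_size.bit_length() - 1)
      else cp_degree
    if cp_degree > 1 then some cp_degree else none

-- ===== PRECONDITION & SPEC =====
-- Pre_ excludes only sequence_length > 32768 with world_size = 0, where the Python A
-- (and B) raises ZeroDivisionError on `world_size % cp_degree`.
def Pre_compute_cp_degree_py (sequence_length : Int) (world_size : Int) : Prop :=
  sequence_length ≤ 32768 ∨ world_size ≠ 0
instance (sequence_length : Int) (world_size : Int) : Decidable (Pre_compute_cp_degree_py sequence_length world_size) := by unfold Pre_compute_cp_degree_py; infer_instance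

def pvWitness_compute_cp_degree_py : Int × Int := (100000, 8)

def Spec_compute_cp_degree_py (sequence_length : Int) (world_size : Int) (out : Option Int) : Prop := out = compute_cp_degree_py_alt sequence_length world_size
instance (sequence_length : Int) (world_size : Int) (out : Option Int) : Decidable (Spec_compute_cp_degree_py sequence_length world_size out) := by unfold Spec_compute_cp_degree_py; infer_instance

-- ===== CLAIM (what is proved, stated in full; the proofs are below) =====
def Claim_equal_compute_cp_degree_py : Prop := ∀ (sequence_length : Int) (world_size : Int), Dom_compute_cp_degree_py sequence_length world_size → Pre_compute_cp_degree_py sequence_length world_size → Spec_compute_cp_degree_py sequence_length world_size (compute_cp_degree_py sequence_length world_size)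

-- ===== LEMMAS AND PROOFS =====

-- The loop reaches exactly m * 2^k when seq < (m*2^k)*32769 and every strictly smaller
-- power-of-two multiple of m still fails, i.e. (m*2^(k-1))*32769 ≤ seq (or k = 0).
theorem pyLoopA_reaches (seq : Int) :
    ∀ (k : Nat) (m : Int) (hm : 0 < m),
      seq < (m * 2 ^ k) * 32769 →
      (k = 0 ∨ (m * 2 ^ (k - 1)) * 32769 ≤ seq) →
      pyLoopA seq m hm = m * 2 ^ k := by
  intro k
  induction k with
  | zero =>
      intro m hm hlt _
      rw [pyLoopA]
      norm_num at hlt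
      have : PySem.Int.floordiv seq m < 32769 := by
        rw [PySem.Int.floordiv_lt_iff_lt_mul hm]
        linarith
      simp [show ¬ (32768 < PySem.Int.floordiv seq m) by omega]
  | succ k ih =>
      intro m hm hlt hge
      have hge' : (m * 2 ^ k) * 32769 ≤ seq := by
        rcases hge with h | h
        · omega
        · simpa using h
      have hcond : 32768 < PySem.Int.floordiv seq m := by
        have hmle : m * 32769 ≤ (m * 2 ^ k) * 32769 := by
          have h1 : (1 : Int) ≤ 2 ^ k := one_le_pow₀ (by norm_num)
          nlinarith
        have : (32769 : Int) ≤ PySem.Int.floordiv seq m := by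
          rw [PySem.Int.le_floordiv_iff_mul_le hm]
          nlinarith
        omega
      rw [pyLoopA, dif_pos hcond]
      have hstep := ih (m * 2) (by omega)
        (by have he : (m * 2) * 2 ^ k = m * 2 ^ (k + 1) := by ring
            rw [he]; exact hlt)
        (by cases k with
            | zero => exact Or.inl rfl
            | succ j =>
                right
                have he : (m * 2) * 2 ^ (j + 1 - 1) = m * 2 ^ (j + 1) := by
                  simp [pow_succ]; ring
                rw [he]
                simpa using hge')
      exact hstep.trans (by ring)

theorem loop_closed (seq : Int) (hs : 32768 < seq) (h2 : (0:Int) < 2) :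
    pyLoopA seq 2 h2 =
      max 2 ((2 : Int) ^ PySem.Int.bitLength (PySem.Int.floordiv seq 32769)) := by
  have castpow : ∀ n : Nat, ((2 ^ n : Nat) : Int) = (2:Int) ^ n := by
    intro n; push_cast; ring
  have h32769 : (0 : Int) < 32769 := by norm_num
  have hq0 : (0:Int) ≤ PySem.Int.floordiv seq 32769 := by
    rw [PySem.Int.le_floordiv_iff_mul_le h32769]; omega
  have hdecomp := PySem.Int.floordiv_mul_add_mod seq 32769
  have hr0 := PySem.Int.mod_nonneg seq h32769
  have hr1 := PySem.Int.mod_lt seq h32769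
  have hqlt : PySem.Int.floordiv seq 32769 <
      (2:Int) ^ PySem.Int.bitLength (PySem.Int.floordiv seq 32769) := by
    have h1 : ((PySem.Int.floordiv seq 32769).natAbs : Int) <
        ((2 ^ PySem.Int.bitLength (PySem.Int.floordiv seq 32769) : Nat) : Int) := by
      exact_mod_cast PySem.Int.lt_two_pow_bitLength (PySem.Int.floordiv seq 32769)
    rw [castpow] at h1; omega
  by_cases hble : PySem.Int.bitLength (PySem.Int.floordiv seq 32769) ≤ 1
  · -- q ≤ 1, min_cp = 2 : the loop exits immediately
    have h2bl : (2:Int) ^ PySem.Int.bitLength (PySem.Int.floordiv seq 32769) ≤ 2 := by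
      interval_cases h : PySem.Int.bitLength (PySem.Int.floordiv seq 32769) <;> norm_num
    have hmax : max 2 ((2:Int) ^ PySem.Int.bitLength (PySem.Int.floordiv seq 32769)) = 2 := by
      omega
    rw [hmax]
    have := pyLoopA_reaches seq 0 2 h2 (by norm_num; omega) (Or.inl rfl)
    simpa using this
  · -- bl ≥ 2, min_cp = 2^bl
    have hqn0 : PySem.Int.floordiv seq 32769 ≠ 0 := by
      intro h
      rw [h, PySem.Int.bitLength_zero] at hble; omega
    have hqge : (2:Int) ^ (PySem.Int.bitLength (PySem.Int.floordiv seq 32769) - 1) ≤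
        PySem.Int.floordiv seq 32769 := by
      have h1 : ((2 ^ (PySem.Int.bitLength (PySem.Int.floordiv seq 32769) - 1) : Nat) : Int) ≤
          ((PySem.Int.floordiv seq 32769).natAbs : Int) := by
        exact_mod_cast PySem.Int.two_pow_bitLength_le (PySem.Int.floordiv seq 32769) hqn0
      rw [castpow] at h1; omega
    have heq : (2:Int) * 2 ^ (PySem.Int.bitLength (PySem.Int.floordiv seq 32769) - 1) =
        2 ^ PySem.Int.bitLength (PySem.Int.floordiv seq 32769) := by
      rw [← pow_succ']; congr 1; omega
    have heq' : (2:Int) * 2 ^ (PySem.Int.bitLength (PySem.Int.floordiv seq 32769) - 1 - 1) =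
        2 ^ (PySem.Int.bitLength (PySem.Int.floordiv seq 32769) - 1) := by
      rw [← pow_succ']; congr 1; omega
    have hmax : max 2 ((2:Int) ^ PySem.Int.bitLength (PySem.Int.floordiv seq 32769)) =
        2 ^ PySem.Int.bitLength (PySem.Int.floordiv seq 32769) := by
      omega
    rw [hmax]
    have := pyLoopA_reaches seq (PySem.Int.bitLength (PySem.Int.floordiv seq 32769) - 1) 2 h2
      (by rw [heq]; omega)
      (by right; rw [heq']; omega)
    rw [this, heq]

-- ===== VERDICT (by name: the statement is the Claim_ definition above) =====
theorem compute_cp_degree_py_spec : Claim_equal_compute_cp_degree_py := by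
  intro seq w _ _
  unfold Spec_compute_cp_degree_py compute_cp_degree_py compute_cp_degree_py_alt
  by_cases hs : seq ≤ 32768
  · simp [hs]
  · simp only [hs, if_false]
    rw [loop_closed seq (by omega)]
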